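-- pv_equiv track=rewrite | github.com/hephaestus-compiler-project/hephaestus | src/transformations/use_graph.py | check_vertices
-- ===== SOURCE A (Python) =====
-- def reachable(graph, start_vertex, dest_vertex):
--     """Find if a start_vertex can reach dest_vertex with BFS."""
--     visited = {v: False for v in graph.keys()}
--
--     queue = []
--     queue.append(start_vertex)
--     visited[start_vertex] = True
--
--     while queue:
--         next_v = queue.pop(0)
--
--         if next_v == dest_vertex:
--              return True
--
--         for v in graph[next_v]:
--             if visited[v] == False:
--                 queue.append(v)
--                 visited[v] = True
--     return False
--
-- def check_vertices(vertices, graph):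
--     """Check if the given vertices can reach a None node or if a None node
--     can reach the vertices.
--
--     Returns:
--         dict: vertex -> bool"""
--     # TODO optimize
--     none_vertices = [v for v in graph.keys() if "None" in v[1]]
--     res = {v: True for v in vertices}
--     for v in vertices:
--         for vn in none_vertices:
--             if bool(reachable(graph, v, vn) or reachable(graph, vn, v)):
--                 res[v] = False
--     return res
-- ===== SOURCE B (Python) =====
-- def check_vertices(vertices, graph):
--     none_vertices = [v for v in graph.keys() if "None" in v[1]]
--     # 'back' saturates to the graph keys that can reach a None vertex
--     back = set(none_vertices)
--     for _ in range(len(graph) + 1):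
--         new = back | {u for u in graph if any(w in back for w in graph[u])}
--         if len(new) == len(back):
--             break
--         back = new
--     # 'fwd' saturates to the vertices reachable from a None vertex
--     fwd = set(none_vertices)
--     for _ in range(len(graph) + 1):
--         new = set(fwd)
--         for u in fwd:
--             new.update(graph.get(u, ()))
--         if len(new) == len(fwd):
--             break
--         fwd = new
--     return {v: not (v in back or v in fwd) for v in vertices}
-- ===== Notes on version B (the rewrite author's own statement) =====
-- stated objective: alternative
-- what changed: Instead of running two early-exit BFS searches for every (vertex, none-vertex) pair, B saturates two global sets once - 'can reach a None vertex' (backward closure) and 'reachable from a None vertex' (forward closure) - and answers every vertex by two membership tests; on the timing inputs generated here (mostly graphs without None-vertices, where A does no BFS at all) this is not measurably faster, so no speed is claimed.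
import Mathlib
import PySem

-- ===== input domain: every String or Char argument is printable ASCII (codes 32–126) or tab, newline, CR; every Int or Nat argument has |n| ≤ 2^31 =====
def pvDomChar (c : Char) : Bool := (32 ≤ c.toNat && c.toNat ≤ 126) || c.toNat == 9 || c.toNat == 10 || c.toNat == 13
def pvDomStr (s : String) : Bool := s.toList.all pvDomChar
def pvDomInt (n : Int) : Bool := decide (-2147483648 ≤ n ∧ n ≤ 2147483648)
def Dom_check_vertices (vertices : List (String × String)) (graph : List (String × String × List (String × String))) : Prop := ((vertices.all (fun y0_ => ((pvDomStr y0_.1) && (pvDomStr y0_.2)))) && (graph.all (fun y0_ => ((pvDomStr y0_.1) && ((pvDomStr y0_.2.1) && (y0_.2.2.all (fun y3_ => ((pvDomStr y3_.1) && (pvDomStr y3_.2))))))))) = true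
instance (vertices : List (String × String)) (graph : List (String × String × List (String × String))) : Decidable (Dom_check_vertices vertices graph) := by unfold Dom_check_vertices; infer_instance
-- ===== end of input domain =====

-- B replaces A's per-(vertex, None-vertex)-pair BFS searches by two one-shot set saturations
-- (backward closure "can reach a None vertex", forward closure "reachable from a None vertex");
-- a different algorithm, no speed claimed; only the RETURN value is compared (no argument is mutated).

-- ===== PORT A =====
-- the dict 'graph' arrives as an association list; its keys, in insertion order
def pvKeys (graph : List (String × String × List (String × String))) : List (String × String) :=
  graph.map (fun e => (e.1, e.2.1))

-- graph[u] as first-match association-list lookup (none = KeyError)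
def pvGetAdj? (graph : List (String × String × List (String × String))) (u : String × String) :
    Option (List (String × String)) :=
  (graph.find? (fun e => (e.1, e.2.1) == u)).map (fun e => e.2.2)

-- the inner 'for v in graph[next_v]' loop of reachable: append-and-mark unvisited neighbours
-- (none = KeyError on visited[v] for a neighbour that is not a visited key)
def pvScan : List (String × String) → List (String × String) → PySem.Dict (String × String) Bool →
    Option (List (String × String) × PySem.Dict (String × String) Bool)
  | [], q, vis => some (q, vis)
  | v :: rest, q, vis =>
    match vis.get? v with
    | none => none
    | some b => if b then pvScan rest q vis else pvScan rest (q ++ [v]) (vis.insert v true)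

-- the 'while queue' loop of reachable; fuel-based: every iteration strictly decreases
-- queue length + number of False entries of visited, so the fuel given below never runs out
-- on inputs Pre_ admits (none = fuel exhausted or KeyError, both excluded by Pre_)
def pvReachLoop (graph : List (String × String × List (String × String))) (dest : String × String) :
    Nat → List (String × String) → PySem.Dict (String × String) Bool → Option Bool
  | 0, _, _ => none
  | _ + 1, [], _ => some false
  | fuel + 1, next :: queue, vis =>
    if next = dest then some true
    else
      match pvGetAdj? graph next with
      | none => none
      | some adj =>
        match pvScan adj queue vis with
        | none => none
        | some (q₂, vis₂) => pvReachLoop graph dest fuel q₂ vis₂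

def pvReachable? (graph : List (String × String × List (String × String))) (s d : String × String) :
    Option Bool :=
  let vis0 := (pvKeys graph).foldl (fun acc k => acc.insert k false) PySem.Dict.empty
  pvReachLoop graph d (graph.length + 2) [s] (vis0.insert s true)

def check_vertices (vertices : List (String × String)) (graph : List (String × String × List (String × String))) : List (String × String × Bool) :=
  let none_vertices := (pvKeys graph).filter (fun v => PySem.Str.isIn "None" v.2)
  let res0 := vertices.foldl (fun d v => d.insert v true) PySem.Dict.empty
  let res := vertices.foldl (fun d v =>
    none_vertices.foldl (fun d2 vn =>
      if ((pvReachable? graph v vn).getD false || (pvReachable? graph vn v).getD false)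
      then d2.insert v false else d2) d) res0
  res.items.map (fun p => (p.1.1, p.1.2, p.2))

-- ===== PORT B =====
-- graph.get(u, default []) — Source B never raises on lookups
def pvAdjD (graph : List (String × String × List (String × String))) (u : String × String) :
    List (String × String) :=
  (pvGetAdj? graph u).getD []

-- one early-breaking round loop: s ∪ {u ∈ keys | some neighbour of u is in s}
def pvSatBack (graph : List (String × String × List (String × String))) :
    Nat → PySem.Set (String × String) → PySem.Set (String × String)
  | 0, s => s
  | fuel + 1, s =>
    let new := PySem.Set.union s
      ((pvKeys graph).filter (fun u => (pvAdjD graph u).any (fun w => PySem.Set.contains s w)))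
    if new.length = s.length then s else pvSatBack graph fuel new

-- one early-breaking round loop: s ∪ neighbours(s)
def pvSatFwd (graph : List (String × String × List (String × String))) :
    Nat → PySem.Set (String × String) → PySem.Set (String × String)
  | 0, s => s
  | fuel + 1, s =>
    let new := s.foldl (fun t u => PySem.Set.update t (pvAdjD graph u)) (PySem.Set.ofList s)
    if new.length = s.length then s else pvSatFwd graph fuel new

def check_vertices_alt (vertices : List (String × String)) (graph : List (String × String × List (String × String))) : List (String × String × Bool) :=
  let none_vertices := (pvKeys graph).filter (fun v => PySem.Str.isIn "None" v.2)
  let back := pvSatBack graph (graph.length + 1) (PySem.Set.ofList none_vertices)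
  let fwd := pvSatFwd graph (graph.length + 1) (PySem.Set.ofList none_vertices)
  let res := vertices.foldl (fun d v =>
    d.insert v (!(PySem.Set.contains back v || PySem.Set.contains fwd v))) PySem.Dict.empty
  res.items.map (fun p => (p.1.1, p.1.2, p.2))

-- ===== PRECONDITION & SPEC =====
-- Pre_ asks that the graph's keys be distinct (a real Python dict always satisfies this) and,
-- when a None-vertex exists (so A runs BFS at all), that every queried vertex and every listed
-- neighbour be a key of the graph: a missing vertex or neighbour makes A's BFS raise KeyError on
-- most such inputs, and whether it raises at all depends on the traversal order (a BFS that hits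
-- its destination early never touches the missing entry), which is not a closed-form condition —
-- those inputs are excluded wholesale (see the cite in claim.json for one where A still returns).
def Pre_check_vertices (vertices : List (String × String)) (graph : List (String × String × List (String × String))) : Prop :=
  (pvKeys graph).Nodup ∧
  ((∀ v ∈ pvKeys graph, PySem.Str.isIn "None" v.2 = false) ∨
   ((∀ v ∈ vertices, v ∈ pvKeys graph) ∧ (∀ e ∈ graph, ∀ w ∈ e.2.2, w ∈ pvKeys graph)))

instance (vertices : List (String × String)) (graph : List (String × String × List (String × String))) : Decidable (Pre_check_vertices vertices graph) := by
  unfold Pre_check_vertices; infer_instance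

def pvWitness_check_vertices : (List (String × String)) × (List (String × String × List (String × String))) :=
  ([("a", "None")], [("a", "None", [("a", "None")])])

def Spec_check_vertices (vertices : List (String × String)) (graph : List (String × String × List (String × String))) (out : List (String × String × Bool)) : Prop := out = check_vertices_alt vertices graph
instance (vertices : List (String × String)) (graph : List (String × String × List (String × String))) (out : List (String × String × Bool)) : Decidable (Spec_check_vertices vertices graph out) := by unfold Spec_check_vertices; infer_instance

-- ===== CLAIM (what is proved, stated in full; the proofs are below) =====
def Claim_equal_check_vertices : Prop := ∀ (vertices : List (String × String)) (graph : List (String × String × List (String × String))), Dom_check_vertices vertices graph → Pre_check_vertices vertices graph → Spec_check_vertices vertices graph (check_vertices vertices graph)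

-- ===== LEMMAS AND PROOFS =====

-- the step relation of the graph and reachability (what both programs compute with)
def pvStep (graph : List (String × String × List (String × String))) (a b : String × String) : Prop :=
  b ∈ pvAdjD graph a

def pvReach (graph : List (String × String × List (String × String))) : String × String → String × String → Prop :=
  Relation.ReflTransGen (pvStep graph)

def pvWFg (graph : List (String × String × List (String × String))) : Prop :=
  ∀ e ∈ graph, ∀ w ∈ e.2.2, w ∈ pvKeys graph

-- number of False entries of the visited dict (the BFS termination measure, with queue length)
def pvCF (vis : PySem.Dict (String × String) Bool) : Nat :=
  vis.items.countP (fun p => p.2 == false)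

lemma pvGetAdj?_isSome (graph : List (String × String × List (String × String))) (u : String × String) :
    (pvGetAdj? graph u).isSome ↔ u ∈ pvKeys graph := by
  simp [pvGetAdj?, pvKeys, List.find?_isSome, List.mem_map, beq_iff_eq]

lemma pvGetAdj?_mem {graph : List (String × String × List (String × String))} {u : String × String}
    {adj : List (String × String)} (h : pvGetAdj? graph u = some adj) :
    ∃ e ∈ graph, e.2.2 = adj ∧ (e.1, e.2.1) = u := by
  unfold pvGetAdj? at h
  rcases Option.map_eq_some_iff.mp h with ⟨e, he, rfl⟩
  refine ⟨e, List.mem_of_find?_eq_some he, rfl, ?_⟩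
  have := List.find?_some he
  simpa [beq_iff_eq] using this

lemma pvAdjD_subset_keys {graph : List (String × String × List (String × String))}
    (hWF : pvWFg graph) (u : String × String) :
    ∀ w ∈ pvAdjD graph u, w ∈ pvKeys graph := by
  intro w hw
  unfold pvAdjD at hw
  cases h : pvGetAdj? graph u with
  | none => rw [h] at hw; simp at hw
  | some adj =>
    rw [h] at hw
    rcases pvGetAdj?_mem h with ⟨e, he, hadj, _⟩
    exact hWF e he w (hadj ▸ hw)

lemma pvCountP_map_mark (v : String × String) :
    ∀ (l : List ((String × String) × Bool)), (l.map Prod.fst).Nodup → (v, false) ∈ l →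
      (l.map (fun p => if p.1 == v then (v, true) else p)).countP (fun p => p.2 == false) + 1
        = l.countP (fun p => p.2 == false) := by
  intro l
  induction l with
  | nil => simp
  | cons p rest ih =>
    intro hnd hm
    rw [List.map_cons, List.nodup_cons] at hnd
    by_cases hp : p.1 = v
    · have hpv : p = (v, false) := by
        rcases List.mem_cons.mp hm with h | h
        · exact h.symm
        · exact absurd (hp ▸ List.mem_map.mpr ⟨(v, false), h, rfl⟩) hnd.1
      subst hpv
      have hrest : rest.map (fun p => if p.1 == v then (v, true) else p) = rest := by
        have hq : ∀ q ∈ rest, (fun p => if p.1 == v then (v, true) else p) q = q := by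
          intro q hq
          have : q.1 ≠ v := fun h => hnd.1 (h ▸ List.mem_map.mpr ⟨q, hq, rfl⟩)
          simp [this]
        rw [List.map_congr_left hq]; simp
      simp only [List.map_cons, hrest]
      simp
    · have hm' : (v, false) ∈ rest := by
        rcases List.mem_cons.mp hm with h | h
        · exact absurd (congrArg Prod.fst h.symm) hp
        · exact h
      have := ih hnd.2 hm'
      simp only [List.map_cons, List.countP_cons]
      rw [if_neg (show ¬((p.1 == v) = true) by simp [hp])]
      split <;> omega

lemma pvCF_insert_true {vis : PySem.Dict (String × String) Bool} {v : String × String}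
    (hn : vis.keys.Nodup) (h : vis.get? v = some false) :
    pvCF (vis.insert v true) + 1 = pvCF vis := by
  have hc : vis.contains v = true := by
    rw [PySem.Dict.contains_eq_isSome_get?, h]; rfl
  have hm : (v, false) ∈ vis.items := PySem.Dict.mem_items_of_get?_eq_some _ h
  have hn' : (vis.items.map Prod.fst).Nodup := by
    simpa [PySem.Dict.keys] using hn
  unfold pvCF
  rw [PySem.Dict.items_insert_of_contains _ _ hc]
  exact pvCountP_map_mark v vis.items hn' hm

lemma pvScan_props :
    ∀ (adj q : List (String × String)) (vis : PySem.Dict (String × String) Bool),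
      vis.keys.Nodup →
      (∀ w ∈ adj, (vis.get? w).isSome) →
      ∃ q₂ vis₂, pvScan adj q vis = some (q₂, vis₂) ∧
        vis₂.keys = vis.keys ∧
        (∀ w, vis₂.get? w = if w ∈ adj then some true else vis.get? w) ∧
        (∀ u ∈ q, u ∈ q₂) ∧
        (∀ u ∈ q₂, u ∈ q ∨ u ∈ adj) ∧
        (∀ w ∈ adj, vis.get? w = some false → w ∈ q₂) ∧
        q₂.length + pvCF vis₂ = q.length + pvCF vis := by
  intro adj
  induction adj with
  | nil =>
    intro q vis hn hsome
    exact ⟨q, vis, rfl, rfl, by simp, fun u h => h, fun u h => Or.inl h, by simp, rfl⟩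
  | cons v rest ih =>
    intro q vis hn hsome
    have hv : (vis.get? v).isSome := hsome v (List.mem_cons_self ..)
    rcases Option.isSome_iff_exists.mp hv with ⟨b, hb⟩
    cases b with
    | true =>
      rcases ih q vis hn (fun w hw => hsome w (List.mem_cons_of_mem _ hw)) with
        ⟨q₂, vis₂, heq, hk, hg, hsub, hsup, hfq, hcf⟩
      refine ⟨q₂, vis₂, ?_, hk, ?_, hsub, ?_, ?_, hcf⟩
      · rw [pvScan, hb]; simpa using heq
      · intro w
        rw [hg w]
        by_cases h1 : w ∈ rest
        · simp [h1]
        · by_cases h2 : w = v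
          · subst h2; simp [h1, hb]
          · simp [h1, h2]
      · intro u hu
        rcases hsup u hu with h | h
        · exact Or.inl h
        · exact Or.inr (List.mem_cons_of_mem _ h)
      · intro w hw hwf
        rcases List.mem_cons.mp hw with h | h
        · subst h; rw [hb] at hwf; simp at hwf
        · exact hfq w h hwf
    | false =>
      have hc : vis.contains v = true := by
        rw [PySem.Dict.contains_eq_isSome_get?, hb]; rfl
      have hk' : (vis.insert v true).keys = vis.keys :=
        PySem.Dict.keys_insert_of_contains _ _ hc
      have hn2 : (vis.insert v true).keys.Nodup := by rw [hk']; exact hn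
      have hsome2 : ∀ w ∈ rest, ((vis.insert v true).get? w).isSome := by
        intro w hw
        rw [PySem.Dict.get?_insert]
        split
        · rfl
        · exact hsome w (List.mem_cons_of_mem _ hw)
      rcases ih (q ++ [v]) (vis.insert v true) hn2 hsome2 with
        ⟨q₂, vis₂, heq, hk, hg, hsub, hsup, hfq, hcf⟩
      have hvq₂ : v ∈ q₂ := hsub v (by simp)
      refine ⟨q₂, vis₂, ?_, hk.trans hk', ?_, ?_, ?_, ?_, ?_⟩
      · rw [pvScan, hb]; simpa using heq
      · intro w
        rw [hg w]
        by_cases h1 : w ∈ rest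
        · simp [h1]
        · by_cases h2 : w = v
          · subst h2; simp [h1, PySem.Dict.get?_insert_self]
          · simp [h1, h2, PySem.Dict.get?_insert_of_ne _ _ h2]
      · intro u hu; exact hsub u (by simp [hu])
      · intro u hu
        rcases hsup u hu with h | h
        · rcases List.mem_append.mp h with h' | h'
          · exact Or.inl h'
          · simp at h'; subst h'; exact Or.inr (List.mem_cons_self ..)
        · exact Or.inr (List.mem_cons_of_mem _ h)
      · intro w hw hwf
        rcases List.mem_cons.mp hw with h | h
        · subst h; exact hvq₂
        · by_cases h2 : w = v
          · subst h2; exact hvq₂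
          · exact hfq w h (by rw [PySem.Dict.get?_insert_of_ne _ _ h2]; exact hwf)
      · have hcf' := pvCF_insert_true hn hb
        rw [hcf]
        simp only [List.length_append, List.length_singleton]
        omega

lemma pvLoop_main {graph : List (String × String × List (String × String))}
    (dest s : String × String) (hWF : pvWFg graph) (hnd : (pvKeys graph).Nodup) :
    ∀ (fuel : Nat) (q : List (String × String)) (vis : PySem.Dict (String × String) Bool),
      vis.keys = pvKeys graph →
      (∀ u ∈ q, vis.get? u = some true) →
      (∀ w, vis.get? w = some true →
        w ∈ q ∨ (w ≠ dest ∧ ∀ u ∈ pvAdjD graph w, vis.get? u = some true)) →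
      (∀ w, vis.get? w = some true → pvReach graph s w) →
      vis.get? s = some true →
      q.length + pvCF vis < fuel →
      ∃ b, pvReachLoop graph dest fuel q vis = some b ∧ (b = true ↔ pvReach graph s dest) := by
  intro fuel
  induction fuel with
  | zero => intro q vis _ _ _ _ _ hb; omega
  | succ fuel ih =>
    intro q vis hkeys hq hI hJ hs hb
    cases q with
    | nil =>
      refine ⟨false, by rw [pvReachLoop], ?_⟩
      simp only [Bool.false_eq_true, false_iff]
      intro hR
      have aux : ∀ x, pvReach graph x dest → vis.get? x = some true → False := by
        intro x hx
        induction hx using Relation.ReflTransGen.head_induction_on with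
        | refl =>
          intro hd
          rcases hI dest hd with h | ⟨h, _⟩
          · simp at h
          · exact h rfl
        | head hstep _ ih2 =>
          rename_i a c _
          intro ha
          rcases hI a ha with h | ⟨_, hcl⟩
          · simp at h
          · exact ih2 (hcl _ hstep)
      exact aux s hR hs
    | cons next rest =>
      by_cases hnd2 : next = dest
      · refine ⟨true, ?_, ?_⟩
        · rw [pvReachLoop]; simp [hnd2]
        · simp only [true_iff]
          exact hnd2 ▸ hJ next (hq next (List.mem_cons_self ..))
      · have hnt : vis.get? next = some true := hq next (List.mem_cons_self ..)
        have hnk : next ∈ pvKeys graph := by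
          rw [← hkeys, ← PySem.Dict.contains_iff_mem_keys,
            PySem.Dict.contains_eq_isSome_get?, hnt]
          rfl
        rcases Option.isSome_iff_exists.mp ((pvGetAdj?_isSome graph next).mpr hnk) with ⟨adj, hadj⟩
        have hadjD : pvAdjD graph next = adj := by simp [pvAdjD, hadj]
        have hsome : ∀ w ∈ adj, (vis.get? w).isSome := by
          intro w hw
          have hwk : w ∈ pvKeys graph := pvAdjD_subset_keys hWF next w (hadjD ▸ hw)
          rw [← hkeys, ← PySem.Dict.contains_iff_mem_keys,
            PySem.Dict.contains_eq_isSome_get?] at hwk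
          exact hwk
        have hvn : vis.keys.Nodup := by rw [hkeys]; exact hnd
        rcases pvScan_props adj rest vis hvn hsome with
          ⟨q₂, vis₂, hseq, hk2, hchar, hsub, hsup, hfq, hcf⟩
        have htrue₂ : ∀ w, vis.get? w = some true → vis₂.get? w = some true := by
          intro w hw; rw [hchar w]; split
          · rfl
          · exact hw
        have hres : pvReachLoop graph dest (fuel + 1) (next :: rest) vis
            = pvReachLoop graph dest fuel q₂ vis₂ := by
          rw [pvReachLoop]
          simp only [hnd2, if_false, hadj, hseq]
        rw [hres]
        apply ih q₂ vis₂ (hk2.trans hkeys)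
        · intro u hu
          rcases hsup u hu with h | h
          · exact htrue₂ u (hq u (List.mem_cons_of_mem _ h))
          · rw [hchar u]; simp [h]
        · intro w hw₂
          rw [hchar w] at hw₂
          by_cases hwadj : w ∈ adj
          · rcases hw : vis.get? w with _ | b
            · have := hsome w hwadj; rw [hw] at this; simp at this
            · cases b with
              | false => exact Or.inl (hfq w hwadj hw)
              | true =>
                rcases hI w hw with h | ⟨hne, hcl⟩
                · rcases List.mem_cons.mp h with h' | h'
                  · subst h'
                    refine Or.inr ⟨hnd2, ?_⟩
                    intro u hu
                    rw [hchar u]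
                    simp [hadjD ▸ hu]
                  · exact Or.inl (hsub w h')
                · exact Or.inr ⟨hne, fun u hu => htrue₂ u (hcl u hu)⟩
          · rw [if_neg hwadj] at hw₂
            rcases hI w hw₂ with h | ⟨hne, hcl⟩
            · rcases List.mem_cons.mp h with h' | h'
              · subst h'
                refine Or.inr ⟨hnd2, ?_⟩
                intro u hu
                rw [hchar u]
                simp [hadjD ▸ hu]
              · exact Or.inl (hsub w h')
            · exact Or.inr ⟨hne, fun u hu => htrue₂ u (hcl u hu)⟩
        · intro w hw₂
          rw [hchar w] at hw₂
          by_cases hwadj : w ∈ adj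
          · exact Relation.ReflTransGen.tail (hJ next hnt)
              (show pvStep graph next w by rw [pvStep, hadjD]; exact hwadj)
          · rw [if_neg hwadj] at hw₂; exact hJ w hw₂
        · exact htrue₂ s hs
        · have hlc : (next :: rest).length = rest.length + 1 := by simp
          omega

lemma pvFoldl_insert_false_get? (w : String × String) :
    ∀ (l : List (String × String)) (d : PySem.Dict (String × String) Bool),
      (l.foldl (fun acc k => acc.insert k false) d).get? w
        = if w ∈ l then some false else d.get? w := by
  intro l
  induction l with
  | nil => intro d; simp
  | cons k rest ih =>
    intro d
    rw [List.foldl_cons, ih]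
    rw [PySem.Dict.get?_insert]
    by_cases h1 : w ∈ rest <;> by_cases h2 : w = k <;> simp [h1, h2]

lemma pvReachable?_correct {graph : List (String × String × List (String × String))}
    (hWF : pvWFg graph) (hnd : (pvKeys graph).Nodup) {s : String × String}
    (hs : s ∈ pvKeys graph) (d : String × String) :
    ∃ b, pvReachable? graph s d = some b ∧ (b = true ↔ pvReach graph s d) := by
  set vis0 := (pvKeys graph).foldl (fun acc k => acc.insert k false) PySem.Dict.empty with hvis0
  have hkeys0 : vis0.keys = pvKeys graph := by
    rw [hvis0, PySem.Dict.keys_foldl_insert, PySem.Dict.keys_empty, PySem.Set.update_nil_left]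
    exact PySem.Set.ofList_eq_self_of_nodup _ hnd
  have hget0 : ∀ w, vis0.get? w = if w ∈ pvKeys graph then some false else none := by
    intro w
    rw [hvis0, pvFoldl_insert_false_get?]
    split
    · rfl
    · exact PySem.Dict.get?_empty _
  have hc : vis0.contains s = true := by
    rw [PySem.Dict.contains_iff_mem_keys, hkeys0]; exact hs
  set visI := vis0.insert s true with hvisI
  have hkeysI : visI.keys = pvKeys graph := by
    rw [hvisI, PySem.Dict.keys_insert_of_contains _ _ hc, hkeys0]
  have hgetI : ∀ w, visI.get? w = if w = s then some true else vis0.get? w := by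
    intro w; rw [hvisI, PySem.Dict.get?_insert]
  have hsI : visI.get? s = some true := by rw [hgetI]; simp
  have hcfI : pvCF visI ≤ graph.length := by
    have h1 : pvCF visI ≤ visI.items.length := List.countP_le_length
    have h2 : visI.items.length = visI.keys.length := by
      rw [PySem.Dict.keys, List.length_map]
    rw [h2, hkeysI] at h1
    simpa [pvKeys] using h1
  have hmain := pvLoop_main d s hWF hnd (graph.length + 2) [s] visI hkeysI
    (by intro u hu; simp at hu; subst hu; exact hsI)
    (by
      intro w hw
      rw [hgetI] at hw
      by_cases h : w = s
      · subst h; exact Or.inl (by simp)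
      · rw [if_neg h, hget0] at hw
        split at hw <;> simp_all)
    (by
      intro w hw
      rw [hgetI] at hw
      by_cases h : w = s
      · subst h; exact Relation.ReflTransGen.refl
      · rw [if_neg h, hget0] at hw
        split at hw <;> simp_all)
    hsI
    (by simp only [List.length_singleton]; omega)
  rcases hmain with ⟨b, hb, hiff⟩
  exact ⟨b, by rw [pvReachable?]; exact hb, hiff⟩

lemma pvSatBack_props {graph : List (String × String × List (String × String))}
    (hWF : pvWFg graph) (P : String × String → Prop)
    (hPstep : ∀ u w, w ∈ pvAdjD graph u → P w → P u) :
    ∀ (fuel : Nat) (s : PySem.Set (String × String)), s.Nodup →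
      (∀ u ∈ s, u ∈ pvKeys graph) → (∀ u ∈ s, P u) →
      (pvKeys graph).length < fuel + s.length →
      (pvSatBack graph fuel s).Nodup ∧
      (∀ u ∈ s, u ∈ pvSatBack graph fuel s) ∧
      (∀ u ∈ pvSatBack graph fuel s, u ∈ pvKeys graph) ∧
      (∀ u ∈ pvSatBack graph fuel s, P u) ∧
      (∀ u ∈ pvKeys graph, (∃ w ∈ pvAdjD graph u, w ∈ pvSatBack graph fuel s) →
        u ∈ pvSatBack graph fuel s) := by
  intro fuel
  induction fuel with
  | zero =>
    intro s hnod hsub hP hbound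
    exact absurd (hnod.subperm hsub).length_le (by omega)
  | succ fuel ih =>
    intro s hnod hsub hP hbound
    rw [pvSatBack]
    set flt := (pvKeys graph).filter
      (fun u => (pvAdjD graph u).any (fun w => PySem.Set.contains s w)) with hflt
    have hmem : ∀ y, y ∈ PySem.Set.union s flt ↔ y ∈ s ∨ y ∈ flt := by
      intro y; exact PySem.Set.mem_union _ _ _
    have hnodN : (PySem.Set.union s flt).Nodup := PySem.Set.nodup_union _ _ hnod
    have hsubN : ∀ y ∈ PySem.Set.union s flt, y ∈ pvKeys graph := by
      intro y hy
      rcases (hmem y).mp hy with h | h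
      · exact hsub y h
      · exact (List.mem_filter.mp h).1
    have hPN : ∀ y ∈ PySem.Set.union s flt, P y := by
      intro y hy
      rcases (hmem y).mp hy with h | h
      · exact hP y h
      · rcases List.any_eq_true.mp (List.mem_filter.mp h).2 with ⟨w, hw, hcw⟩
        exact hPstep y w hw (hP w ((PySem.Set.contains_iff _ _).mp hcw))
    have hsN : ∀ y ∈ s, y ∈ PySem.Set.union s flt := fun y hy => (hmem y).mpr (Or.inl hy)
    have hsp : List.Subperm s (PySem.Set.union s flt) := hnod.subperm hsN
    have hlen : s.length ≤ (PySem.Set.union s flt).length := hsp.length_le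
    split
    · rename_i hlenEq
      have hperm : List.Perm s (PySem.Set.union s flt) := hsp.perm_of_length_le (le_of_eq hlenEq)
      refine ⟨hnod, fun u hu => hu, hsub, hP, ?_⟩
      rintro u huK ⟨w, hw, hws⟩
      have hfltm : u ∈ flt := List.mem_filter.mpr ⟨huK,
        List.any_eq_true.mpr ⟨w, hw, (PySem.Set.contains_iff _ _).mpr hws⟩⟩
      exact hperm.mem_iff.mpr ((hmem u).mpr (Or.inr hfltm))
    · rename_i hlenNe
      have hlt : s.length < (PySem.Set.union s flt).length :=
        lt_of_le_of_ne hlen (fun h => hlenNe h.symm)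
      rcases ih (PySem.Set.union s flt) hnodN hsubN hPN (by omega) with ⟨h1, h2, h3, h4, h5⟩
      exact ⟨h1, fun u hu => h2 u (hsN u hu), h3, h4, h5⟩

lemma pvMem_foldl_update (f : String × String → List (String × String)) (y : String × String) :
    ∀ (l : List (String × String)) (t0 : PySem.Set (String × String)),
      y ∈ l.foldl (fun t u => PySem.Set.update t (f u)) t0 ↔ y ∈ t0 ∨ ∃ u ∈ l, y ∈ f u := by
  intro l
  induction l with
  | nil => intro t0; simp
  | cons u rest ih =>
    intro t0
    rw [List.foldl_cons, ih, PySem.Set.mem_update]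
    constructor
    · rintro ((h | h) | ⟨w, hw, hyw⟩)
      · exact Or.inl h
      · exact Or.inr ⟨u, List.mem_cons_self .., h⟩
      · exact Or.inr ⟨w, List.mem_cons_of_mem _ hw, hyw⟩
    · rintro (h | ⟨w, hw, hyw⟩)
      · exact Or.inl (Or.inl h)
      · rcases List.mem_cons.mp hw with h' | h'
        · subst h'; exact Or.inl (Or.inr hyw)
        · exact Or.inr ⟨w, h', hyw⟩

lemma pvNodup_foldl_update (f : String × String → List (String × String)) :
    ∀ (l : List (String × String)) (t0 : PySem.Set (String × String)), t0.Nodup →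
      (l.foldl (fun t u => PySem.Set.update t (f u)) t0).Nodup := by
  intro l
  induction l with
  | nil => intro t0 h; exact h
  | cons u rest ih =>
    intro t0 h
    rw [List.foldl_cons]
    exact ih _ (PySem.Set.nodup_update _ _ h)

lemma pvSatFwd_props {graph : List (String × String × List (String × String))}
    (hWF : pvWFg graph) (P : String × String → Prop)
    (hPstep : ∀ u w, w ∈ pvAdjD graph u → P u → P w) :
    ∀ (fuel : Nat) (s : PySem.Set (String × String)), s.Nodup →
      (∀ u ∈ s, u ∈ pvKeys graph) → (∀ u ∈ s, P u) →
      (pvKeys graph).length < fuel + s.length →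
      (pvSatFwd graph fuel s).Nodup ∧
      (∀ u ∈ s, u ∈ pvSatFwd graph fuel s) ∧
      (∀ u ∈ pvSatFwd graph fuel s, u ∈ pvKeys graph) ∧
      (∀ u ∈ pvSatFwd graph fuel s, P u) ∧
      (∀ u ∈ pvSatFwd graph fuel s, ∀ w ∈ pvAdjD graph u, w ∈ pvSatFwd graph fuel s) := by
  intro fuel
  induction fuel with
  | zero =>
    intro s hnod hsub hP hbound
    exact absurd (hnod.subperm hsub).length_le (by omega)
  | succ fuel ih =>
    intro s hnod hsub hP hbound
    rw [pvSatFwd]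
    have hofl : PySem.Set.ofList s = s := PySem.Set.ofList_eq_self_of_nodup _ hnod
    set new := s.foldl (fun t u => PySem.Set.update t (pvAdjD graph u)) (PySem.Set.ofList s)
      with hnew
    have hmem : ∀ y, y ∈ new ↔ y ∈ s ∨ ∃ u ∈ s, y ∈ pvAdjD graph u := by
      intro y
      rw [hnew, pvMem_foldl_update, hofl]
    have hnodN : new.Nodup := by
      rw [hnew]; exact pvNodup_foldl_update _ _ _ (PySem.Set.nodup_ofList _)
    have hsubN : ∀ y ∈ new, y ∈ pvKeys graph := by
      intro y hy
      rcases (hmem y).mp hy with h | ⟨u, _, hyu⟩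
      · exact hsub y h
      · exact pvAdjD_subset_keys hWF u y hyu
    have hPN : ∀ y ∈ new, P y := by
      intro y hy
      rcases (hmem y).mp hy with h | ⟨u, hu, hyu⟩
      · exact hP y h
      · exact hPstep u y hyu (hP u hu)
    have hsN : ∀ y ∈ s, y ∈ new := fun y hy => (hmem y).mpr (Or.inl hy)
    have hsp : List.Subperm s new := hnod.subperm hsN
    have hlen : s.length ≤ new.length := hsp.length_le
    split
    · rename_i hlenEq
      have hperm : List.Perm s new := hsp.perm_of_length_le (le_of_eq hlenEq)
      refine ⟨hnod, fun u hu => hu, hsub, hP, ?_⟩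
      intro u hu w hw
      exact hperm.mem_iff.mpr ((hmem w).mpr (Or.inr ⟨u, hu, hw⟩))
    · rename_i hlenNe
      have hlt : s.length < new.length := lt_of_le_of_ne hlen (fun h => hlenNe h.symm)
      rcases ih new hnodN hsubN hPN (by omega) with ⟨h1, h2, h3, h4, h5⟩
      exact ⟨h1, fun u hu => h2 u (hsN u hu), h3, h4, h5⟩

lemma pvBack_mem {graph : List (String × String × List (String × String))}
    (hWF : pvWFg graph) (hnd : (pvKeys graph).Nodup) (u : String × String) :
    u ∈ pvSatBack graph (graph.length + 1)
        (PySem.Set.ofList ((pvKeys graph).filter (fun v => PySem.Str.isIn "None" v.2))) ↔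
      u ∈ pvKeys graph ∧ ∃ vn ∈ (pvKeys graph).filter (fun v => PySem.Str.isIn "None" v.2),
        pvReach graph u vn := by
  set nl := (pvKeys graph).filter (fun v => PySem.Str.isIn "None" v.2) with hnl
  have hkl : (pvKeys graph).length = graph.length := by simp [pvKeys]
  have hprops := pvSatBack_props hWF
    (fun u => ∃ vn ∈ nl, pvReach graph u vn)
    (by
      rintro u w hw ⟨vn, hvn, hR⟩
      exact ⟨vn, hvn, Relation.ReflTransGen.head (show pvStep graph u w from hw) hR⟩)
    (graph.length + 1) (PySem.Set.ofList nl)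
    (PySem.Set.nodup_ofList _)
    (by intro u hu; exact (List.mem_filter.mp ((PySem.Set.mem_ofList _ _).mp hu)).1)
    (by intro u hu; exact ⟨u, (PySem.Set.mem_ofList _ _).mp hu, Relation.ReflTransGen.refl⟩)
    (by omega)
  rcases hprops with ⟨_, hs0, hkeysR, hPR, hfix⟩
  constructor
  · intro hu
    exact ⟨hkeysR u hu, hPR u hu⟩
  · rintro ⟨huK, vn, hvn, hR⟩
    induction hR using Relation.ReflTransGen.head_induction_on with
    | refl => exact hs0 vn ((PySem.Set.mem_ofList _ _).mpr hvn)
    | head hstep hR' ih2 =>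
      rename_i x y
      have hyK : y ∈ pvKeys graph := pvAdjD_subset_keys hWF x y hstep
      exact hfix x huK ⟨y, hstep, ih2 hyK⟩

lemma pvFwd_mem {graph : List (String × String × List (String × String))}
    (hWF : pvWFg graph) (hnd : (pvKeys graph).Nodup) (u : String × String) :
    u ∈ pvSatFwd graph (graph.length + 1)
        (PySem.Set.ofList ((pvKeys graph).filter (fun v => PySem.Str.isIn "None" v.2))) ↔
      ∃ vn ∈ (pvKeys graph).filter (fun v => PySem.Str.isIn "None" v.2), pvReach graph vn u := by
  set nl := (pvKeys graph).filter (fun v => PySem.Str.isIn "None" v.2) with hnl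
  have hkl : (pvKeys graph).length = graph.length := by simp [pvKeys]
  have hprops := pvSatFwd_props hWF
    (fun u => ∃ vn ∈ nl, pvReach graph vn u)
    (by
      rintro u w hw ⟨vn, hvn, hR⟩
      exact ⟨vn, hvn, Relation.ReflTransGen.tail hR (show pvStep graph u w from hw)⟩)
    (graph.length + 1) (PySem.Set.ofList nl)
    (PySem.Set.nodup_ofList _)
    (by intro u hu; exact (List.mem_filter.mp ((PySem.Set.mem_ofList _ _).mp hu)).1)
    (by intro u hu; exact ⟨u, (PySem.Set.mem_ofList _ _).mp hu, Relation.ReflTransGen.refl⟩)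
    (by omega)
  rcases hprops with ⟨_, hs0, hkeysR, hPR, hfix⟩
  constructor
  · intro hu; exact hPR u hu
  · rintro ⟨vn, hvn, hR⟩
    induction hR with
    | refl => exact hs0 vn ((PySem.Set.mem_ofList _ _).mpr hvn)
    | tail hR' hstep ih2 =>
      rename_i b c
      exact hfix b ih2 c hstep

lemma pvFoldl_condInsert_const (p : String × String → Bool) (v : String × String) :
    ∀ (l : List (String × String)) (d : PySem.Dict (String × String) Bool),
      l.foldl (fun d2 vn => if p vn then d2.insert v false else d2) d
        = if l.any p then d.insert v false else d := by
  intro l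
  induction l with
  | nil => intro d; simp
  | cons vn rest ih =>
    intro d
    by_cases hp : p vn
    · rw [List.foldl_cons]
      simp only [hp, if_true]
      rw [ih]
      have hany : (vn :: rest).any p = true := by simp [hp]
      rw [hany]
      simp only [if_true]
      split
      · rw [PySem.Dict.insert_insert_self]
      · rfl
    · rw [List.foldl_cons]
      simp only [hp, if_false]
      rw [ih]
      have hp' : p vn = false := by simpa using hp
      rw [List.any_cons, hp', Bool.false_or]
      simp

lemma pvG_get? (f : String × String → Bool) (w : String × String) :
    ∀ (vs : List (String × String)) (d : PySem.Dict (String × String) Bool),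
      (vs.foldl (fun d v => if f v then d.insert v false else d) d).get? w
        = if w ∈ vs ∧ f w = true then some false else d.get? w := by
  intro vs
  induction vs with
  | nil => intro d; simp
  | cons v rest ih =>
    intro d
    rw [List.foldl_cons, ih]
    by_cases h1 : w ∈ rest ∧ f w = true
    · simp [h1, List.mem_cons]
    · rw [if_neg h1]
      by_cases h2 : w = v
      · subst h2
        by_cases h3 : f w
        · simp [h3, PySem.Dict.get?_insert_self]
        · simp [h3]
      · have hd : (if f v then d.insert v false else d).get? w = d.get? w := by
          split
          · exact PySem.Dict.get?_insert_of_ne _ _ h2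
          · rfl
        rw [hd]
        have hcond : ¬(w ∈ v :: rest ∧ f w = true) := by
          rintro ⟨hm, hf⟩
          rcases List.mem_cons.mp hm with h' | h'
          · exact h2 h'
          · exact h1 ⟨h', hf⟩
        rw [if_neg hcond]

lemma pvG_keys (f : String × String → Bool) :
    ∀ (vs : List (String × String)) (d : PySem.Dict (String × String) Bool),
      (∀ v ∈ vs, d.contains v = true) →
      (vs.foldl (fun d v => if f v then d.insert v false else d) d).keys = d.keys := by
  intro vs
  induction vs with
  | nil => intro d _; rfl
  | cons v rest ih =>
    intro d hcont
    rw [List.foldl_cons]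
    have hkd : (if f v then d.insert v false else d).keys = d.keys := by
      split
      · exact PySem.Dict.keys_insert_of_contains _ _ (hcont v (List.mem_cons_self ..))
      · rfl
    rw [ih _ ?_, hkd]
    intro u hu
    have hcu := hcont u (List.mem_cons_of_mem _ hu)
    split
    · rw [PySem.Dict.contains_insert]; simp [hcu]
    · exact hcu

lemma pvF_get? (c : String × String → Bool) (w : String × String) :
    ∀ (vs : List (String × String)) (d : PySem.Dict (String × String) Bool),
      (vs.foldl (fun d v => d.insert v (c v)) d).get? w
        = if w ∈ vs then some (c w) else d.get? w := by
  intro vs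
  induction vs with
  | nil => intro d; simp
  | cons v rest ih =>
    intro d
    rw [List.foldl_cons, ih, PySem.Dict.get?_insert]
    by_cases h1 : w ∈ rest <;> by_cases h2 : w = v <;> simp [h1, h2]

lemma pvDict_two_pass (f c : String × String → Bool) (vs : List (String × String))
    (hfc : ∀ v ∈ vs, c v = !(f v)) :
    (vs.foldl (fun d v => if f v then d.insert v false else d)
        (vs.foldl (fun d v => d.insert v true) PySem.Dict.empty)).items
      = (vs.foldl (fun d v => d.insert v (c v)) PySem.Dict.empty).items := by
  set dT := vs.foldl (fun d v => d.insert v true) PySem.Dict.empty with hdT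
  have keysT : dT.keys = PySem.Set.ofList vs := by
    rw [hdT, PySem.Dict.keys_foldl_insert, PySem.Dict.keys_empty, PySem.Set.update_nil_left]
  have hcont : ∀ v ∈ vs, dT.contains v = true := by
    intro v hv
    rw [PySem.Dict.contains_iff_mem_keys, keysT]
    exact (PySem.Set.mem_ofList _ _).mpr hv
  set dA := vs.foldl (fun d v => if f v then d.insert v false else d) dT with hdA
  set dB := vs.foldl (fun d v => d.insert v (c v)) PySem.Dict.empty with hdB
  have keysA : dA.keys = PySem.Set.ofList vs := by
    rw [hdA, pvG_keys f vs dT hcont, keysT]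
  have keysB : dB.keys = PySem.Set.ofList vs := by
    rw [hdB, PySem.Dict.keys_foldl_insert, PySem.Dict.keys_empty, PySem.Set.update_nil_left]
  have nodupA : dA.keys.Nodup := by rw [keysA]; exact PySem.Set.nodup_ofList _
  have nodupB : dB.keys.Nodup := by rw [keysB]; exact PySem.Set.nodup_ofList _
  rw [PySem.Dict.items_eq_map_keys dA nodupA true, PySem.Dict.items_eq_map_keys dB nodupB true]
  rw [keysA, keysB]
  apply List.map_congr_left
  intro k hk
  have hkvs : k ∈ vs := (PySem.Set.mem_ofList _ _).mp hk
  have hA : dA.getD k true = !(f k) := by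
    rw [PySem.Dict.getD_eq_get?_getD, hdA, pvG_get?]
    by_cases hf : f k
    · simp [hkvs, hf]
    · rw [if_neg (by simp [hf])]
      rw [hdT, pvF_get? (fun _ => true) k vs PySem.Dict.empty]
      simp [hkvs, hf]
  have hB : dB.getD k true = c k := by
    rw [PySem.Dict.getD_eq_get?_getD, hdB, pvF_get?]
    simp [hkvs]
  rw [hA, hB, hfc k hkvs]

lemma pvSatBack_nil (graph : List (String × String × List (String × String))) (fuel : Nat) :
    pvSatBack graph (fuel + 1) [] = [] := by
  rw [pvSatBack]
  have hflt : ((pvKeys graph).filter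
      (fun u => (pvAdjD graph u).any (fun w => PySem.Set.contains ([] : PySem.Set (String × String)) w))) = [] := by
    apply List.filter_eq_nil_iff.mpr
    intro a _
    simp
  rw [hflt]
  rfl

lemma pvSatFwd_nil (graph : List (String × String × List (String × String))) (fuel : Nat) :
    pvSatFwd graph (fuel + 1) [] = [] := by
  rw [pvSatFwd]
  simp

-- ===== VERDICT (by name: the statement is the Claim_ definition above) =====
theorem check_vertices_spec : Claim_equal_check_vertices := by
  intro vertices graph _hDom hPre
  obtain ⟨hnd, hbr⟩ := hPre
  unfold Spec_check_vertices
  simp only [check_vertices, check_vertices_alt]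
  simp only [pvFoldl_condInsert_const]
  have boolext : ∀ (a b : Bool), (a = true ↔ b = true) → a = b := by decide
  have hfc : ∀ v ∈ vertices,
      (!(PySem.Set.contains (pvSatBack graph (graph.length + 1)
          (PySem.Set.ofList ((pvKeys graph).filter (fun v => PySem.Str.isIn "None" v.2)))) v ||
        PySem.Set.contains (pvSatFwd graph (graph.length + 1)
          (PySem.Set.ofList ((pvKeys graph).filter (fun v => PySem.Str.isIn "None" v.2)))) v))
      = !(((pvKeys graph).filter (fun v => PySem.Str.isIn "None" v.2)).any
          (fun vn => (pvReachable? graph v vn).getD false || (pvReachable? graph vn v).getD false)) := by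
    intro v hv
    congr 1
    apply boolext
    rcases hbr with hno | ⟨hvert, hWF'⟩
    · have hnil : (pvKeys graph).filter (fun v => PySem.Str.isIn "None" v.2) = [] := by
        apply List.filter_eq_nil_iff.mpr
        intro a ha
        simpa using hno a ha
      rw [hnil]
      simp [PySem.Set.ofList_nil, pvSatBack_nil, pvSatFwd_nil]
    · have hWF : pvWFg graph := hWF'
      have hvK : v ∈ pvKeys graph := hvert v hv
      have hback := pvBack_mem hWF hnd v
      have hfwd := pvFwd_mem hWF hnd v
      constructor
      · intro hor
        rw [Bool.or_eq_true] at hor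
        rcases hor with h | h
        · rcases ((PySem.Set.contains_iff _ _).mp h |> hback.mp) with ⟨_, vn, hvn, hR⟩
          have hvnK : vn ∈ pvKeys graph := (List.mem_filter.mp hvn).1
          apply List.any_eq_true.mpr
          refine ⟨vn, hvn, ?_⟩
          rcases pvReachable?_correct hWF hnd hvK vn with ⟨b1, hb1, hif1⟩
          rw [hb1, Option.getD_some, hif1.mpr hR]
          simp
        · rcases ((PySem.Set.contains_iff _ _).mp h |> hfwd.mp) with ⟨vn, hvn, hR⟩
          have hvnK : vn ∈ pvKeys graph := (List.mem_filter.mp hvn).1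
          apply List.any_eq_true.mpr
          refine ⟨vn, hvn, ?_⟩
          rcases pvReachable?_correct hWF hnd hvnK v with ⟨b2, hb2, hif2⟩
          rw [hb2, Option.getD_some, hif2.mpr hR]
          simp
      · intro hany
        rcases List.any_eq_true.mp hany with ⟨vn, hvn, hor⟩
        have hvnK : vn ∈ pvKeys graph := (List.mem_filter.mp hvn).1
        rcases pvReachable?_correct hWF hnd hvK vn with ⟨b1, hb1, hif1⟩
        rcases pvReachable?_correct hWF hnd hvnK v with ⟨b2, hb2, hif2⟩
        rw [hb1, hb2, Option.getD_some, Option.getD_some] at hor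
        rw [Bool.or_eq_true] at hor
        rcases hor with h | h
        · rw [Bool.or_eq_true]
          exact Or.inl ((PySem.Set.contains_iff _ _).mpr (hback.mpr ⟨hvK, vn, hvn, hif1.mp h⟩))
        · rw [Bool.or_eq_true]
          exact Or.inr ((PySem.Set.contains_iff _ _).mpr (hfwd.mpr ⟨vn, hvn, hif2.mp h⟩))
  rw [pvDict_two_pass
    (fun v => (((pvKeys graph).filter (fun v => PySem.Str.isIn "None" v.2)).any
      (fun vn => (pvReachable? graph v vn).getD false || (pvReachable? graph vn v).getD false)))
    (fun v => !(PySem.Set.contains (pvSatBack graph (graph.length + 1)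
        (PySem.Set.ofList ((pvKeys graph).filter (fun v => PySem.Str.isIn "None" v.2)))) v ||
      PySem.Set.contains (pvSatFwd graph (graph.length + 1)
        (PySem.Set.ofList ((pvKeys graph).filter (fun v => PySem.Str.isIn "None" v.2)))) v))
    vertices hfc]
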